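-- pv_equiv track=rewrite | github.com/materialsvirtuallab/maml | maml/apps/pes/_lammps.py | get_bs_subscripts
-- ===== SOURCE A (Python) =====
-- import itertools
--
-- def get_bs_subscripts(twojmax):
--     """
--     Method to list the subscripts 2j1, 2j2, 2j of bispectrum
--     components.
--
--     Args:
--         twojmax (int): Band limit for bispectrum components.
--
--     Returns:
--         List of all subscripts [2j1, 2j2, 2j].
--
--     """
--
--     subs = itertools.product(range(twojmax + 1), repeat=3)
--
--     filters = [lambda x: x[0] >= x[1], lambda x: x[2] >= x[0]]
--     j_filter = [lambda x: x[2] in range(x[0] - x[1], min(twojmax, x[0] + x[1]) + 1, 2)]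
--     filters.extend(j_filter)
--     for f in filters:
--         subs = filter(f, subs)
--     return list(subs)
-- ===== SOURCE B (Python) =====
-- def get_bs_subscripts(twojmax):
--     subs = []
--     for j1 in range(twojmax + 1):
--         for j2 in range(j1 + 1):
--             for j in range(j1 + j2 % 2, min(twojmax, j1 + j2) + 1, 2):
--                 subs.append((j1, j2, j))
--     return subs
-- ===== Notes on version B (the rewrite author's own statement) =====
-- stated objective: faster
-- what changed: Replaces the cube itertools.product plus three chained filters with nested loops whose bounds (j2 up to j1, j stepping by 2 from j1 + j2%2) generate exactly the valid triples, never materializing rejected ones.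
import Mathlib
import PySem

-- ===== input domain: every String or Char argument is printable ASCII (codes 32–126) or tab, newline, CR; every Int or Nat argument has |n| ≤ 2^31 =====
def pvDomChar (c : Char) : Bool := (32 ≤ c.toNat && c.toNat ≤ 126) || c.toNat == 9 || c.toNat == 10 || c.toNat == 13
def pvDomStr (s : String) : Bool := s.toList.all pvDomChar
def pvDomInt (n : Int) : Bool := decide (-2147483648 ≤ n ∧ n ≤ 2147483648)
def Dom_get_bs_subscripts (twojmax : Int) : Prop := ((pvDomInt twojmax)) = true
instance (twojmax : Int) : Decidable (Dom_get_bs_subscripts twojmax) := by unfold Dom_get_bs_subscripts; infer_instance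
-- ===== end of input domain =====

-- B replaces A's "cube product + chain of three filters" with three nested loops that
-- generate exactly the valid triples directly (objective: faster — skips rejected triples).

-- ===== PORT A =====
-- itertools.product(range(twojmax+1), repeat=3), then the three filters applied in order.
def get_bs_subscripts (twojmax : Int) : List (Int × Int × Int) :=
  let r := PySem.List.pyRange 0 (twojmax + 1) 1
  let subs := r.flatMap (fun a => r.flatMap (fun b => r.map (fun c => (a, b, c))))
  let subs := subs.filter (fun x => decide (x.2.1 ≤ x.1))
  let subs := subs.filter (fun x => decide (x.1 ≤ x.2.2))
  let subs := subs.filter (fun x =>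
    decide (x.2.2 ∈ PySem.List.pyRange (x.1 - x.2.1) (min twojmax (x.1 + x.2.1) + 1) 2))
  subs

-- ===== PORT B =====
-- Nested loops: j1 in range(twojmax+1), j2 in range(j1+1),
-- j in range(j1 + j2 % 2, min(twojmax, j1 + j2) + 1, 2); append (j1, j2, j).
def get_bs_subscripts_alt (twojmax : Int) : List (Int × Int × Int) :=
  (PySem.List.pyRange 0 (twojmax + 1) 1).foldl (fun subs j1 =>
    (PySem.List.pyRange 0 (j1 + 1) 1).foldl (fun subs j2 =>
      (PySem.List.pyRange (j1 + PySem.Int.mod j2 2) (min twojmax (j1 + j2) + 1) 2).foldl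
        (fun subs j => subs ++ [(j1, j2, j)]) subs) subs) []

-- ===== PRECONDITION & SPEC =====
def Spec_get_bs_subscripts (twojmax : Int) (out : List (Int × Int × Int)) : Prop := out = get_bs_subscripts_alt twojmax
instance (twojmax : Int) (out : List (Int × Int × Int)) : Decidable (Spec_get_bs_subscripts twojmax out) := by unfold Spec_get_bs_subscripts; infer_instance

-- ===== CLAIM (what is proved, stated in full; the proofs are below) =====
def Claim_equal_get_bs_subscripts : Prop := ∀ (twojmax : Int), Dom_get_bs_subscripts twojmax → Spec_get_bs_subscripts twojmax (get_bs_subscripts twojmax)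

-- ===== LEMMAS AND PROOFS =====

-- pyRange with step 2 is strictly increasing
lemma pairwise_lt_pyRange_two (a b : Int) :
    List.Pairwise (fun x y => x < y) (PySem.List.pyRange a b 2) := by
  rw [PySem.List.pyRange_of_pos a b (by norm_num)]
  refine List.pairwise_map.mpr ?_
  refine List.pairwise_lt_range.imp ?_
  intro x y h; omega

-- drop a tail of the loop range whose iterations contribute nothing
lemma flatMap_pyRange_prefix {β : Type} (a m b : Int) (h1 : a ≤ m) (h2 : m ≤ b)
    (F : Int → List β) (h : ∀ x, m ≤ x → x < b → F x = []) :
    (PySem.List.pyRange a b 1).flatMap F = (PySem.List.pyRange a m 1).flatMap F := by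
  have htail : (PySem.List.pyRange m b 1).flatMap F = [] := by
    refine List.flatMap_eq_nil_iff.mpr ?_
    intro x hx
    rw [PySem.List.mem_pyRange_one] at hx
    exact h x hx.1 hx.2
  rw [PySem.List.pyRange_one_append a m b h1 h2, List.flatMap_append, htail, List.append_nil]

-- the inner filtered step-1 range of A equals B's step-2 range, per fixed (j1, j2)
lemma key_filter_eq (t j1 j2 : Int) (h2 : 0 ≤ j2) (h21 : j2 ≤ j1) (_h1t : j1 ≤ t) (p : Int → Bool)
    (hp : ∀ j, p j = true ↔
      (j2 ≤ j1 ∧ j1 ≤ j ∧ j ∈ PySem.List.pyRange (j1 - j2) (min t (j1 + j2) + 1) 2)) :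
    (PySem.List.pyRange 0 (t + 1) 1).filter p
      = PySem.List.pyRange (j1 + PySem.Int.mod j2 2) (min t (j1 + j2) + 1) 2 := by
  have hmod : PySem.Int.mod j2 2 = j2 % 2 := PySem.Int.mod_eq_emod_of_pos (by norm_num)
  have hL : List.Pairwise (fun x y => x < y) ((PySem.List.pyRange 0 (t + 1) 1).filter p) :=
    (PySem.List.pairwise_lt_pyRange_one 0 (t + 1)).filter p
  have hR := pairwise_lt_pyRange_two (j1 + PySem.Int.mod j2 2) (min t (j1 + j2) + 1)
  refine List.Perm.eq_of_pairwise (fun a b _ _ hab hba => by omega) hL hR ?_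
  refine (List.perm_ext_iff_of_nodup (hL.imp ne_of_lt) (hR.imp ne_of_lt)).mpr ?_
  intro x
  rw [List.mem_filter, hp, PySem.List.mem_pyRange_one,
    PySem.List.mem_pyRange_iff_of_pos (by norm_num : (0:Int) < 2),
    PySem.List.mem_pyRange_iff_of_pos (by norm_num : (0:Int) < 2), hmod]
  omega

theorem get_bs_subscripts_spec_aux (t : Int) :
    get_bs_subscripts t = get_bs_subscripts_alt t := by
  unfold get_bs_subscripts get_bs_subscripts_alt
  simp only [PySem.List.foldl_append_eq_flatMap, List.nil_append,
    List.filter_flatMap, List.filter_map, List.filter_filter, Function.comp]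
  refine List.flatMap_congr ?_
  intro j1 hj1
  rw [PySem.List.mem_pyRange_one] at hj1
  rw [flatMap_pyRange_prefix 0 (j1 + 1) (t + 1) (by omega) (by omega) _ ?side]
  case side =>
    intro j2 hj2 _
    rw [List.filter_eq_nil_iff.mpr, List.map_nil]
    intro c _
    simp only [Bool.and_eq_true, decide_eq_true_eq, not_and]
    intro h1 h2
    omega
  refine List.flatMap_congr ?_
  intro j2 hj2
  rw [PySem.List.mem_pyRange_one] at hj2
  rw [key_filter_eq t j1 j2 (by omega) (by omega) (by omega)]
  · exact List.map_eq_flatMap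
  · intro j
    simp only [Bool.and_eq_true, decide_eq_true_eq]
    tauto

-- ===== VERDICT (by name: the statement is the Claim_ definition above) =====
theorem get_bs_subscripts_spec : Claim_equal_get_bs_subscripts := by
  intro t _
  exact get_bs_subscripts_spec_aux t
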